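-- pv_equiv track=rewrite | github.com/GranusClarvis/clarvis | scripts/arc_solver.py | scale_grid
-- ===== SOURCE A (Python) =====
-- from typing import List, Tuple, Optional, Callable
--
-- Grid = List[List[int]]
--
-- def scale_grid(g: Grid, factor: int) -> Grid:
--     """Scale each cell into a factor×factor block."""
--     result = []
--     for row in g:
--         expanded_row = []
--         for cell in row:
--             expanded_row.extend([cell] * factor)
--         for _ in range(factor):
--             result.append(list(expanded_row))
--     return result
-- ===== SOURCE B (Python) =====
-- def scale_grid(g, factor):
--     """Scale each cell into a factor x factor block (index-mapping decomposition)."""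
--     result = []
--     for i in range(len(g) * factor):
--         src = g[i // factor]
--         result.append([src[j // factor] for j in range(len(src) * factor)])
--     return result
-- ===== Notes on version B (the rewrite author's own statement) =====
-- stated objective: alternative
-- what changed: B maps each output cell directly to its source cell via integer division over output indices, instead of A's building an expanded row by repeated extends and appending copies of it.
import Mathlib
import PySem

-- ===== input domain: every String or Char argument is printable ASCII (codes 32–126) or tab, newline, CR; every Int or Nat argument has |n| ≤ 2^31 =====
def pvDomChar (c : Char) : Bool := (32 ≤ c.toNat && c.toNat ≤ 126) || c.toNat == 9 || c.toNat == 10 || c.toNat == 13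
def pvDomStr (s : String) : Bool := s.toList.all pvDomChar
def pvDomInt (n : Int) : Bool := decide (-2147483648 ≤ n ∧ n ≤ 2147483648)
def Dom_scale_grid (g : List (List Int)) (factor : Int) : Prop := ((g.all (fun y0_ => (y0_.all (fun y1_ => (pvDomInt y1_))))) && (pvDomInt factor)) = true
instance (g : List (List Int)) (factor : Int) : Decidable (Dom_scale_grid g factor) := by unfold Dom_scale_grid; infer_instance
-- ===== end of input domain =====

-- B builds each output row directly from output indices via integer division (i//factor, j//factor)
-- instead of A's replicate-and-copy construction; alternative decomposition, same cost.

-- ===== PORT A =====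
-- '[cell] * factor' and 'range(factor)' with factor ≤ 0 give the empty list, matching '.toNat'.
def scale_grid (g : List (List Int)) (factor : Int) : List (List Int) :=
  g.foldl (fun result row =>
    let expanded_row := row.foldl (fun er cell => er ++ List.replicate factor.toNat cell) []
    (List.range factor.toNat).foldl (fun r _ => r ++ [expanded_row]) result) []

-- ===== PORT B =====
-- 'range(len(g)*factor)' is empty for factor ≤ 0, matching '* factor.toNat'; the indices
-- i//factor, j//factor are in range whenever the ranges are nonempty, so getD never defaults.
def scale_grid_alt (g : List (List Int)) (factor : Int) : List (List Int) :=
  (List.range (g.length * factor.toNat)).map (fun i =>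
    let src := g.getD (i / factor.toNat) []
    (List.range (src.length * factor.toNat)).map (fun j => src.getD (j / factor.toNat) 0))

-- ===== PRECONDITION & SPEC =====
def Spec_scale_grid (g : List (List Int)) (factor : Int) (out : List (List Int)) : Prop := out = scale_grid_alt g factor
instance (g : List (List Int)) (factor : Int) (out : List (List Int)) : Decidable (Spec_scale_grid g factor out) := by unfold Spec_scale_grid; infer_instance

-- ===== CLAIM (what is proved, stated in full; the proofs are below) =====
def Claim_equal_scale_grid : Prop := ∀ (g : List (List Int)) (factor : Int), Dom_scale_grid g factor → Spec_scale_grid g factor (scale_grid g factor)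

-- ===== LEMMAS AND PROOFS =====

lemma foldl_append_flatMap {α β : Type} (F : α → List β) :
    ∀ (l : List α) (acc : List β), l.foldl (fun a x => a ++ F x) acc = acc ++ l.flatMap F := by
  intro l
  induction l with
  | nil => intro acc; simp
  | cons x t ih => intro acc; simp [ih, List.flatMap_cons]

lemma flatMap_range_singleton {β : Type} (a : β) :
    ∀ (n : Nat), (List.range n).flatMap (fun _ => [a]) = List.replicate n a := by
  intro n
  induction n with
  | zero => simp
  | succ m ih =>
    rw [List.range_succ]
    simp [ih, List.replicate_succ']

lemma key {α β : Type} (f : Nat) (d : α) (h : α → β) :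
    ∀ (l : List α),
      (List.range (l.length * f)).map (fun i => h (l.getD (i / f) d))
        = l.flatMap (fun x => List.replicate f (h x)) := by
  intro l
  induction l with
  | nil => simp
  | cons x t ih =>
    rcases Nat.eq_zero_or_pos f with hf | hf
    · subst hf; simp
    · have hlen : (x :: t).length * f = f + t.length * f := by
        simp [List.length_cons, Nat.succ_mul, Nat.add_comm]
      rw [hlen, List.range_add, List.map_append, List.map_map, List.flatMap_cons]
      congr 1
      · have h0 : ∀ i ∈ List.range f,
            h ((x :: t).getD (i / f) d) = h x := by
          intro i hi
          have : i / f = 0 := Nat.div_eq_of_lt (List.mem_range.mp hi)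
          simp [this]
        rw [List.map_congr_left h0]
        simp
      · have hstep : ∀ k ∈ List.range (t.length * f),
            ((fun i => h ((x :: t).getD (i / f) d)) ∘ (f + ·)) k
              = h (t.getD (k / f) d) := by
          intro k _
          have : (f + k) / f = k / f + 1 := by
            rw [Nat.add_comm]; exact Nat.add_div_right k hf
          simp [Function.comp, this]
        rw [List.map_congr_left hstep]
        exact ih

lemma key' (f : Nat) (l : List Int) :
    (List.range (l.length * f)).map (fun j => l.getD (j / f) 0)
      = l.flatMap (fun x => List.replicate f x) := by
  simpa using key f (0 : Int) id l

-- ===== VERDICT (by name: the statement is the Claim_ definition above) =====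
theorem scale_grid_spec : Claim_equal_scale_grid := by
  intro g factor _
  unfold Spec_scale_grid
  have hA : scale_grid g factor
      = g.flatMap (fun row =>
          List.replicate factor.toNat (row.flatMap (fun c => List.replicate factor.toNat c))) := by
    unfold scale_grid
    simp only [foldl_append_flatMap, flatMap_range_singleton, List.nil_append]
  have hB : scale_grid_alt g factor
      = g.flatMap (fun row =>
          List.replicate factor.toNat (row.flatMap (fun c => List.replicate factor.toNat c))) := by
    unfold scale_grid_alt
    refine (key factor.toNat ([] : List Int)
      (fun src => (List.range (src.length * factor.toNat)).map
        (fun j => src.getD (j / factor.toNat) 0)) g).trans ?_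
    simp only [key']
  rw [hA, hB]
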